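-- pv_equiv track=rewrite | github.com/fdehoti/CliqueCover_SATSolver | clique_cover_sat.py | decode_model
-- ===== SOURCE A (Python) =====
-- def decode_model(model, n, k):
--     colors = {c: [] for c in range(1, k + 1)}
--
--     for assignment in model:
--         if assignment > 0:
--             v = (assignment - 1) // k + 1
--             c = ((assignment - 1) % k) + 1
--             colors[c].append(v)
--
--     return {c: sorted(vs) for c, vs in colors.items() if len(vs) > 0}
-- ===== SOURCE B (Python) =====
-- def decode_model(model, n, k):
--     pairs = [((a - 1) % k + 1, (a - 1) // k + 1) for a in model if a > 0]
--     pairs.sort(key=lambda p: p[1])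
--     pairs.sort(key=lambda p: p[0])  # stable: within a color, vertices stay ascending
--     out = {}
--     i = 0
--     while i < len(pairs):
--         c = pairs[i][0]
--         j = i + 1
--         while j < len(pairs) and pairs[j][0] == c:
--             j += 1
--         out[c] = [v for _, v in pairs[i:j]]
--         i = j
--     return out
-- ===== Notes on version B (the rewrite author's own statement) =====
-- stated objective: alternative
-- what changed: B drops A's color-keyed bucket dictionary and per-bucket sorts: it decodes each positive literal to a (color, vertex) pair, stably sorts the pairs once (by vertex, then by color), and emits the groups in a single run-grouping scan over the sorted pairs.
import Mathlib
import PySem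

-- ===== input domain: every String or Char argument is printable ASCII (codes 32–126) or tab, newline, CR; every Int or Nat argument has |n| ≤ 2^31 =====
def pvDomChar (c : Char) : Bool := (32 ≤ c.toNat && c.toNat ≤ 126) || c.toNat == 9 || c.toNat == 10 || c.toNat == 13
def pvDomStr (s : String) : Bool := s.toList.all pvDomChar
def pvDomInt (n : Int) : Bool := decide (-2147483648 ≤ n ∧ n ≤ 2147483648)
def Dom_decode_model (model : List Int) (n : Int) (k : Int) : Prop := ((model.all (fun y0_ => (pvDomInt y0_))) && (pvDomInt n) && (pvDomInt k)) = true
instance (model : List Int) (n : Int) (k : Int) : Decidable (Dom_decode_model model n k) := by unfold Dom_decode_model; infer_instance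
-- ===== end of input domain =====

-- B replaces A's color-keyed bucket dictionary and per-bucket sorts by a dict-free pipeline:
-- decode each positive literal to a (color, vertex) pair, stably sort the pairs (by vertex,
-- then by color), and emit the groups in ONE run-grouping scan over the sorted pairs.
-- Objective: alternative (same O(m log m) cost, different algorithm).

-- ===== PORT A =====
def decode_model (model : List Int) (n : Int) (k : Int) : List (Int × List Int) :=
  -- colors = {c: [] for c in range(1, k + 1)}
  let colors : PySem.Dict Int (List Int) :=
    (PySem.List.pyRange 1 (k + 1) 1).foldl (fun d c => d.insert c []) PySem.Dict.empty
  -- for assignment in model: if assignment > 0: colors[c].append(v)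
  -- (colors[c].append(v) ported as modify; Python raises KeyError if c were absent — excluded by Pre_)
  let colors : PySem.Dict Int (List Int) :=
    model.foldl (fun d assignment =>
      if assignment > 0 then
        d.modify (PySem.Int.mod (assignment - 1) k + 1) []
          (· ++ [PySem.Int.floordiv (assignment - 1) k + 1])
      else d) colors
  -- {c: sorted(vs) for c, vs in colors.items() if len(vs) > 0}
  (colors.items.filter (fun p => p.2.length > 0)).map
    (fun p => (p.1, PySem.List.sorted p.2 (fun x => x) false))

-- ===== PORT B =====
-- the while loop of Source B: scan the sorted pairs, cutting each maximal run of one color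
-- (i..j in Source B = the head plus the takeWhile prefix; the loop resumes at j = the dropWhile rest)
def pv_runs : List (Int × Int) → List (Int × List Int)
  | [] => []
  | p :: t =>
      (p.1, p.2 :: (t.takeWhile (fun q => q.1 == p.1)).map (fun q => q.2)) ::
        pv_runs (t.dropWhile (fun q => q.1 == p.1))
termination_by l => l.length
decreasing_by
  have := List.length_dropWhile_le (fun q : Int × Int => q.1 == p.1) t
  simp; omega

def decode_model_alt (model : List Int) (n : Int) (k : Int) : List (Int × List Int) :=
  -- pairs = [((a - 1) % k + 1, (a - 1) // k + 1) for a in model if a > 0]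
  let pairs0 : List (Int × Int) :=
    (model.filter (fun a => decide (0 < a))).map
      (fun a => (PySem.Int.mod (a - 1) k + 1, PySem.Int.floordiv (a - 1) k + 1))
  -- pairs.sort(key=lambda p: p[1]); pairs.sort(key=lambda p: p[0])
  let pairs1 := PySem.List.sorted pairs0 (fun p => p.2) false
  let pairs := PySem.List.sorted pairs1 (fun p => p.1) false
  -- the while loop building out[c] run by run
  pv_runs pairs

-- ===== PRECONDITION & SPEC =====
-- Pre_ excludes exactly the inputs on which A raises: a positive literal together with k ≤ 0
-- (ZeroDivisionError for k = 0, KeyError for k < 0); A returns on every admitted input.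
def Pre_decode_model (model : List Int) (n : Int) (k : Int) : Prop :=
  1 ≤ k ∨ ∀ a ∈ model, a ≤ 0
instance (model : List Int) (n : Int) (k : Int) : Decidable (Pre_decode_model model n k) := by
  unfold Pre_decode_model; infer_instance

def pvWitness_decode_model : List Int × Int × Int := ([5, -2, 3, 8], 4, 2)

def Spec_decode_model (model : List Int) (n : Int) (k : Int) (out : List (Int × List Int)) : Prop := out = decode_model_alt model n k
instance (model : List Int) (n : Int) (k : Int) (out : List (Int × List Int)) : Decidable (Spec_decode_model model n k out) := by unfold Spec_decode_model; infer_instance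

-- ===== CLAIM (what is proved, stated in full; the proofs are below) =====
def Claim_equal_decode_model : Prop := ∀ (model : List Int) (n : Int) (k : Int), Dom_decode_model model n k → Pre_decode_model model n k → Spec_decode_model model n k (decode_model model n k)

-- ===== LEMMAS AND PROOFS =====

-- the group of color c read off the unsorted positive literals (A's bucket before sorting)
def pv_G (model : List Int) (k c : Int) : List Int :=
  ((model.filter (fun x => decide (0 < x))).filter
      (fun a => PySem.Int.mod (a - 1) k + 1 == c)).map
    (fun a => PySem.Int.floordiv (a - 1) k + 1)

-- ---- A-side: characterise the bucket dictionary ----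

theorem pv_fold_getD (k : Int) (l : List Int) (d : PySem.Dict Int (List Int)) (c : Int) :
    (l.foldl (fun d a =>
        d.modify (PySem.Int.mod (a - 1) k + 1) []
          (· ++ [PySem.Int.floordiv (a - 1) k + 1])) d).getD c []
      = d.getD c [] ++ ((l.filter (fun a => PySem.Int.mod (a - 1) k + 1 == c)).map
          (fun a => PySem.Int.floordiv (a - 1) k + 1)) := by
  induction l generalizing d with
  | nil => simp
  | cons a t ih =>
    simp only [List.foldl_cons, ih, List.filter_cons]
    by_cases h : PySem.Int.mod (a - 1) k + 1 = c
    · simp [h]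
    · have h' : ¬ (c = PySem.Int.mod (a - 1) k + 1) := fun e => h e.symm
      simp [PySem.Dict.getD_modify, h, h']

theorem pv_fold_keys (k : Int) (l : List Int) (d : PySem.Dict Int (List Int)) :
    (l.foldl (fun d a =>
        d.modify (PySem.Int.mod (a - 1) k + 1) []
          (· ++ [PySem.Int.floordiv (a - 1) k + 1])) d).keys
      = PySem.Set.update d.keys (l.map (fun a => PySem.Int.mod (a - 1) k + 1)) := by
  simpa using PySem.Dict.keys_foldl_modify_key l (fun a => PySem.Int.mod (a - 1) k + 1) []
    (fun _ a v => v ++ [PySem.Int.floordiv (a - 1) k + 1]) d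

theorem pv_init_items (k : Int) :
    ((PySem.List.pyRange 1 (k + 1) 1).foldl (fun d c => d.insert c [])
        (PySem.Dict.empty : PySem.Dict Int (List Int))).items
      = (PySem.List.pyRange 1 (k + 1) 1).map (fun c => (c, ([] : List Int))) := by
  simpa using PySem.Dict.items_foldl_insert_fresh (PySem.List.pyRange 1 (k + 1) 1)
    (fun c => c) (fun _ => ([] : List Int)) PySem.Dict.empty (by simp)
    (by simpa using PySem.List.nodup_pyRange_one 1 (k + 1))

theorem pv_init_keys (k : Int) :
    ((PySem.List.pyRange 1 (k + 1) 1).foldl (fun d c => d.insert c [])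
        (PySem.Dict.empty : PySem.Dict Int (List Int))).keys
      = PySem.List.pyRange 1 (k + 1) 1 := by
  simp only [PySem.Dict.keys, pv_init_items, List.map_map]
  exact (List.map_congr_left (fun c _ => rfl)).trans (List.map_id _)

theorem pv_init_getD (k c : Int) :
    ((PySem.List.pyRange 1 (k + 1) 1).foldl (fun d c => d.insert c [])
        (PySem.Dict.empty : PySem.Dict Int (List Int))).getD c [] = [] := by
  by_cases hc : c ∈ PySem.List.pyRange 1 (k + 1) 1
  · exact PySem.Dict.getD_of_mem_items _
      (by rw [pv_init_items]; exact List.mem_map_of_mem hc)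
      (by rw [pv_init_keys]; exact PySem.List.nodup_pyRange_one 1 (k + 1)) []
  · apply PySem.Dict.getD_of_not_contains
    have h : ¬ (((PySem.List.pyRange 1 (k + 1) 1).foldl (fun d c => d.insert c [])
        (PySem.Dict.empty : PySem.Dict Int (List Int))).contains c = true) := by
      rw [PySem.Dict.contains_iff_mem_keys, pv_init_keys]; exact hc
    simpa using h

-- every color code lands in range(1, k+1) when k ≥ 1
theorem pv_key_mem (k : Int) (hk : 1 ≤ k) (a : Int) :
    PySem.Int.mod (a - 1) k + 1 ∈ PySem.List.pyRange 1 (k + 1) 1 := by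
  rw [PySem.List.mem_pyRange_one]
  have h1 := PySem.Int.mod_nonneg (a - 1) (show (0:Int) < k by omega)
  have h2 := PySem.Int.mod_lt (a - 1) (show (0:Int) < k by omega)
  omega

-- characterisation of port A (k ≥ 1)
theorem pv_A_char (model : List Int) (n k : Int) (hk : 1 ≤ k) :
    decode_model model n k
      = ((PySem.List.pyRange 1 (k + 1) 1).filter
            (fun c => decide (0 < (pv_G model k c).length))).map
          (fun c => (c, PySem.List.sorted (pv_G model k c) (fun x => x) false)) := by
  simp only [decode_model, gt_iff_lt]
  rw [PySem.List.foldl_ite_eq_foldl_filter (p := fun a : Int => (0:Int) < a)]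
  have hK : ((model.filter (fun x => decide (0 < x))).foldl (fun d a =>
        d.modify (PySem.Int.mod (a - 1) k + 1) []
          (· ++ [PySem.Int.floordiv (a - 1) k + 1]))
        ((PySem.List.pyRange 1 (k + 1) 1).foldl (fun d c => d.insert c [])
          (PySem.Dict.empty : PySem.Dict Int (List Int)))).keys
      = PySem.List.pyRange 1 (k + 1) 1 := by
    rw [pv_fold_keys, pv_init_keys, PySem.Set.update_eq_append_filter]
    have hnil : List.filter (fun y => !PySem.Set.contains (PySem.List.pyRange 1 (k + 1) 1) y)
        (PySem.Set.ofList ((model.filter (fun x => decide (0 < x))).map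
          (fun a => PySem.Int.mod (a - 1) k + 1))) = [] := by
      rw [List.filter_eq_nil_iff]
      intro y hy
      have hy' := (PySem.Set.mem_ofList _ _).mp hy
      obtain ⟨a, _, rfl⟩ := List.mem_map.mp hy'
      simp [PySem.Set.contains_eq_listContains, pv_key_mem k hk a]
    rw [hnil, List.append_nil]
  have hNd : ((model.filter (fun x => decide (0 < x))).foldl (fun d a =>
        d.modify (PySem.Int.mod (a - 1) k + 1) []
          (· ++ [PySem.Int.floordiv (a - 1) k + 1]))
        ((PySem.List.pyRange 1 (k + 1) 1).foldl (fun d c => d.insert c [])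
          (PySem.Dict.empty : PySem.Dict Int (List Int)))).keys.Nodup := by
    rw [hK]; exact PySem.List.nodup_pyRange_one 1 (k + 1)
  have hG : ∀ c, ((model.filter (fun x => decide (0 < x))).foldl (fun d a =>
        d.modify (PySem.Int.mod (a - 1) k + 1) []
          (· ++ [PySem.Int.floordiv (a - 1) k + 1]))
        ((PySem.List.pyRange 1 (k + 1) 1).foldl (fun d c => d.insert c [])
          (PySem.Dict.empty : PySem.Dict Int (List Int)))).getD c [] = pv_G model k c := by
    intro c
    rw [pv_fold_getD, pv_init_getD, List.nil_append]
    rfl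
  rw [PySem.Dict.items_eq_map_keys _ hNd ([] : List Int), hK, List.filter_map, List.map_map]
  simp only [Function.comp_def, hG]

-- ---- B-side: stability of the insertion sort (filter by a key class commutes with sorting) ----

theorem pv_insertBy_pairwise {α : Type} (f : α → Int) (x : α) (acc : List α)
    (h : acc.Pairwise (fun a b => f a ≤ f b)) :
    (PySem.List.insertBy (fun a b => decide (f a < f b)) x acc).Pairwise
      (fun a b => f a ≤ f b) := by
  induction acc with
  | nil => simp [PySem.List.insertBy]
  | cons y ys ih =>
    rw [List.pairwise_cons] at h
    by_cases hb : f x < f y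
    · rw [show PySem.List.insertBy (fun a b => decide (f a < f b)) x (y :: ys)
          = x :: y :: ys from by simp [PySem.List.insertBy, hb]]
      rw [List.pairwise_cons, List.pairwise_cons]
      refine ⟨?_, h.1, h.2⟩
      intro z hz
      rcases List.mem_cons.mp hz with rfl | hz2
      · omega
      · have := h.1 z hz2; omega
    · rw [show PySem.List.insertBy (fun a b => decide (f a < f b)) x (y :: ys)
          = y :: PySem.List.insertBy (fun a b => decide (f a < f b)) x ys from by
        simp [PySem.List.insertBy, hb]]
      rw [List.pairwise_cons]
      refine ⟨?_, ih h.2⟩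
      intro z hz
      rcases (PySem.List.mem_insertBy _ _ _ _).mp hz with rfl | hz2
      · omega
      · exact h.1 z hz2

theorem pv_insertBy_filter_ne {α : Type} (f : α → Int) (c : Int) (x : α) (acc : List α)
    (hx : ¬ f x = c) :
    (PySem.List.insertBy (fun a b => decide (f a < f b)) x acc).filter (fun y => f y == c)
      = acc.filter (fun y => f y == c) := by
  induction acc with
  | nil => simp [PySem.List.insertBy, hx]
  | cons y ys ih =>
    by_cases hb : f x < f y
    · rw [show PySem.List.insertBy (fun a b => decide (f a < f b)) x (y :: ys)
          = x :: y :: ys from by simp [PySem.List.insertBy, hb]]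
      simp [List.filter_cons, hx]
    · rw [show PySem.List.insertBy (fun a b => decide (f a < f b)) x (y :: ys)
          = y :: PySem.List.insertBy (fun a b => decide (f a < f b)) x ys from by
        simp [PySem.List.insertBy, hb]]
      rw [List.filter_cons, List.filter_cons, ih]

theorem pv_insertBy_filter_eq {α : Type} (f : α → Int) (c : Int) (x : α) (acc : List α)
    (hx : f x = c) (h : acc.Pairwise (fun a b => f a ≤ f b)) :
    (PySem.List.insertBy (fun a b => decide (f a < f b)) x acc).filter (fun y => f y == c)
      = acc.filter (fun y => f y == c) ++ [x] := by
  induction acc with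
  | nil => simp [PySem.List.insertBy, hx]
  | cons y ys ih =>
    rw [List.pairwise_cons] at h
    by_cases hb : f x < f y
    · -- x goes in front: nothing after it can be in class c (all keys > c)
      have hy : ¬ f y = c := by omega
      have hys : (ys.filter (fun z => f z == c)) = [] := by
        rw [List.filter_eq_nil_iff]
        intro z hz
        have := h.1 z hz
        simp only [beq_iff_eq]; omega
      rw [show PySem.List.insertBy (fun a b => decide (f a < f b)) x (y :: ys)
          = x :: y :: ys from by simp [PySem.List.insertBy, hb]]
      simp [List.filter_cons, hx, hy, hys]
    · rw [show PySem.List.insertBy (fun a b => decide (f a < f b)) x (y :: ys)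
          = y :: PySem.List.insertBy (fun a b => decide (f a < f b)) x ys from by
        simp [PySem.List.insertBy, hb]]
      rw [List.filter_cons, List.filter_cons, ih h.2]
      by_cases hy : f y = c <;> simp [hy]

theorem pv_foldl_filter {α : Type} (f : α → Int) (c : Int) (xs : List α) (acc : List α)
    (h : acc.Pairwise (fun a b => f a ≤ f b)) :
    ((xs.foldl (fun acc x => PySem.List.insertBy (fun a b => decide (f a < f b)) x acc)
        acc).filter (fun y => f y == c))
      = acc.filter (fun y => f y == c) ++ xs.filter (fun y => f y == c) := by
  induction xs generalizing acc with
  | nil => simp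
  | cons x t ih =>
    rw [List.foldl_cons, ih _ (pv_insertBy_pairwise f x acc h), List.filter_cons]
    by_cases hx : f x = c
    · rw [pv_insertBy_filter_eq f c x acc hx h]
      simp [hx]
    · rw [pv_insertBy_filter_ne f c x acc hx]
      simp [hx]

-- sorted is stable: the elements of one key class come out in their input order
theorem pv_sorted_filter_stable {α : Type} (f : α → Int) (c : Int) (xs : List α) :
    (PySem.List.sorted xs f false).filter (fun y => f y == c)
      = xs.filter (fun y => f y == c) := by
  rw [PySem.List.sorted_eq_foldl_insertBy]
  simpa using pv_foldl_filter f c xs [] (by simp)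

-- ---- B-side: the run-grouping scan on a fst-sorted pair list ----

theorem pv_filter_eq_takeWhile (t : List (Int × Int)) (c : Int)
    (h : t.Pairwise (fun p q => p.1 ≤ q.1)) (hc : ∀ q ∈ t, c ≤ q.1) :
    t.filter (fun q => q.1 == c) = t.takeWhile (fun q => q.1 == c) := by
  induction t with
  | nil => rfl
  | cons q t ih =>
    rw [List.pairwise_cons] at h
    by_cases hq : q.1 = c
    · rw [List.filter_cons_of_pos (by simp [hq]), List.takeWhile_cons_of_pos (by simp [hq]),
        ih h.2 (fun r hr => hq ▸ h.1 r hr)]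
    · have h1 : c < q.1 := lt_of_le_of_ne (hc q (List.mem_cons_self)) (Ne.symm hq)
      have hnil : t.filter (fun r => r.1 == c) = [] := by
        rw [List.filter_eq_nil_iff]
        intro r hr
        have := h.1 r hr
        simp only [beq_iff_eq]; omega
      rw [List.filter_cons_of_neg (by simp [hq]), hnil,
        List.takeWhile_cons_of_neg (by simp [hq])]

theorem pv_dropWhile_gt (t : List (Int × Int)) (c : Int)
    (h : t.Pairwise (fun p q => p.1 ≤ q.1)) (hc : ∀ q ∈ t, c ≤ q.1) :
    ∀ q ∈ t.dropWhile (fun q => q.1 == c), c < q.1 := by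
  induction t with
  | nil => simp
  | cons q t ih =>
    rw [List.pairwise_cons] at h
    by_cases hq : q.1 = c
    · rw [List.dropWhile_cons_of_pos (by simp [hq])]
      exact ih h.2 (fun r hr => hq ▸ h.1 r hr)
    · rw [List.dropWhile_cons_of_neg (by simp [hq])]
      intro r hr
      rcases List.mem_cons.mp hr with rfl | hr
      · exact lt_of_le_of_ne (hc _ List.mem_cons_self) (Ne.symm hq)
      · have h1 : c < q.1 := lt_of_le_of_ne (hc q (List.mem_cons_self)) (Ne.symm hq)
        have := h.1 r hr
        omega

-- membership in the emitted colors
theorem pv_runs_mem (l : List (Int × Int)) (c : Int)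
    (h : l.Pairwise (fun p q => p.1 ≤ q.1)) :
    c ∈ (pv_runs l).map Prod.fst ↔ ∃ q ∈ l, q.1 = c := by
  induction l using pv_runs.induct with
  | case1 => simp [pv_runs]
  | case2 p t ih =>
    rw [List.pairwise_cons] at h
    have hdp : (t.dropWhile (fun q => q.1 == p.1)).Pairwise (fun p q => p.1 ≤ q.1) :=
      List.Pairwise.sublist (List.dropWhile_sublist _) h.2
    rw [pv_runs]
    simp only [List.map_cons, List.mem_cons, ih hdp]
    constructor
    · rintro (rfl | ⟨q, hq, rfl⟩)
      · exact ⟨p, Or.inl rfl, rfl⟩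
      · exact ⟨q, Or.inr (List.Sublist.mem hq (List.dropWhile_sublist _)), rfl⟩
    · rintro ⟨q, hq, rfl⟩
      rcases hq with rfl | hq
      · exact Or.inl rfl
      · by_cases hc : q.1 = p.1
        · exact Or.inl hc
        · refine Or.inr ⟨q, ?_, rfl⟩
          have hsplit : t.takeWhile (fun r => r.1 == p.1) ++ t.dropWhile (fun r => r.1 == p.1) = t :=
            List.takeWhile_append_dropWhile
          rcases List.mem_append.mp (hsplit ▸ hq) with htk | hdr
          · exact absurd (by simpa using List.mem_takeWhile_imp htk) hc
          · exact hdr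

-- the emitted colors are strictly increasing
theorem pv_runs_pairwise (l : List (Int × Int))
    (h : l.Pairwise (fun p q => p.1 ≤ q.1)) :
    ((pv_runs l).map Prod.fst).Pairwise (· < ·) := by
  induction l using pv_runs.induct with
  | case1 => simp [pv_runs]
  | case2 p t ih =>
    rw [List.pairwise_cons] at h
    have hdp : (t.dropWhile (fun q => q.1 == p.1)).Pairwise (fun p q => p.1 ≤ q.1) :=
      List.Pairwise.sublist (List.dropWhile_sublist _) h.2
    rw [pv_runs]
    simp only [List.map_cons, List.pairwise_cons]
    refine ⟨?_, ih hdp⟩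
    intro c hc
    obtain ⟨q, hq, rfl⟩ := ((pv_runs_mem _ c hdp).mp hc)
    exact pv_dropWhile_gt t p.1 h.2 h.1 q hq

-- what each run contains: exactly the class filter of the whole list
theorem pv_runs_char (l : List (Int × Int))
    (h : l.Pairwise (fun p q => p.1 ≤ q.1)) :
    pv_runs l = ((pv_runs l).map Prod.fst).map
      (fun c => (c, (l.filter (fun q => q.1 == c)).map (fun q => q.2))) := by
  induction l using pv_runs.induct with
  | case1 => simp [pv_runs]
  | case2 p t ih =>
    rw [List.pairwise_cons] at h
    have hdp : (t.dropWhile (fun q => q.1 == p.1)).Pairwise (fun p q => p.1 ≤ q.1) :=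
      List.Pairwise.sublist (List.dropWhile_sublist _) h.2
    have hsplit : t.takeWhile (fun r => r.1 == p.1) ++ t.dropWhile (fun r => r.1 == p.1) = t :=
      List.takeWhile_append_dropWhile
    rw [pv_runs]
    simp only [List.map_cons, List.map_cons]
    congr 1
    · -- the head run is the class filter of p.1
      have hhead : (p :: t).filter (fun q => q.1 == p.1)
          = p :: t.takeWhile (fun q => q.1 == p.1) := by
        rw [List.filter_cons_of_pos (by simp), pv_filter_eq_takeWhile t p.1 h.2 h.1]
      rw [hhead]
      simp
    · -- the remaining runs: their class filters ignore the head run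
      conv_lhs => rw [ih hdp]
      refine List.map_congr_left (fun c hc => ?_)
      obtain ⟨q, hq, rfl⟩ := (pv_runs_mem _ c hdp).mp hc
      have hgt : p.1 < q.1 := pv_dropWhile_gt t p.1 h.2 h.1 q hq
      congr 2
      have htk : (t.takeWhile (fun r => r.1 == p.1)).filter (fun r => r.1 == q.1) = [] := by
        rw [List.filter_eq_nil_iff]
        intro r hr
        have := List.mem_takeWhile_imp hr
        simp only [beq_iff_eq] at this ⊢
        omega
      conv_rhs => rw [List.filter_cons_of_neg (p := fun r : Int × Int => r.1 == q.1)
        (a := p) (by simp; omega), ← hsplit, List.filter_append, htk]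
      rw [List.nil_append]

-- ---- assembling the two sides ----

-- a bucket is nonempty iff its color occurs among the positive literals
theorem pv_G_pos (model : List Int) (k c : Int) :
    0 < (pv_G model k c).length
      ↔ ∃ a ∈ model.filter (fun x => decide (0 < x)), PySem.Int.mod (a - 1) k + 1 = c := by
  simp only [pv_G, List.length_map, List.length_pos_iff, ne_eq, List.filter_eq_nil_iff]
  push_neg
  simp

-- B's doubly sorted pair list, named
def pv_L2 (model : List Int) (k : Int) : List (Int × Int) :=
  PySem.List.sorted
    (PySem.List.sorted
      ((model.filter (fun a => decide (0 < a))).map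
        (fun a => (PySem.Int.mod (a - 1) k + 1, PySem.Int.floordiv (a - 1) k + 1)))
      (fun p => p.2) false)
    (fun p => p.1) false

theorem pv_L2_pairwise (model : List Int) (k : Int) :
    (pv_L2 model k).Pairwise (fun p q => p.1 ≤ q.1) :=
  PySem.List.sorted_pairwise _ _

-- the class filter of L2, projected to vertices, is A's bucket sorted
theorem pv_vals_eq (model : List Int) (k c : Int) :
    ((pv_L2 model k).filter (fun q => q.1 == c)).map (fun q => q.2)
      = PySem.List.sorted (pv_G model k c) (fun x => x) false := by
  have hstab : (pv_L2 model k).filter (fun q => q.1 == c)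
      = (PySem.List.sorted
          ((model.filter (fun a => decide (0 < a))).map
            (fun a => (PySem.Int.mod (a - 1) k + 1, PySem.Int.floordiv (a - 1) k + 1)))
          (fun p => p.2) false).filter (fun q => q.1 == c) :=
    pv_sorted_filter_stable (fun p : Int × Int => p.1) c _
  symm
  apply PySem.List.sorted_id_eq_of_perm_of_pairwise
  · -- permutation with A's bucket
    rw [hstab]
    have hperm := PySem.List.sorted_perm
      ((model.filter (fun a => decide (0 < a))).map
        (fun a => (PySem.Int.mod (a - 1) k + 1, PySem.Int.floordiv (a - 1) k + 1)))
      (fun p => p.2) false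
    refine ((hperm.filter _).map _).trans ?_
    rw [List.filter_map]
    unfold pv_G
    rw [List.map_map]
    rfl
  · -- ascending vertices within the class, by stability of the second sort
    rw [hstab]
    exact List.Pairwise.map _ (fun a b h => h) (List.Pairwise.filter _
      (PySem.List.sorted_pairwise _ (fun p : Int × Int => p.2)))

-- B's emitted colors = A's range filtered to the nonempty buckets (k ≥ 1)
theorem pv_colors_eq (model : List Int) (k : Int) (hk : 1 ≤ k) :
    (pv_runs (pv_L2 model k)).map Prod.fst
      = (PySem.List.pyRange 1 (k + 1) 1).filter
          (fun c => decide (0 < (pv_G model k c).length)) := by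
  have hmemL2 : ∀ q, q ∈ pv_L2 model k ↔
      ∃ a ∈ model.filter (fun x => decide (0 < x)),
        (PySem.Int.mod (a - 1) k + 1, PySem.Int.floordiv (a - 1) k + 1) = q := by
    intro q
    unfold pv_L2
    rw [PySem.List.mem_sorted, PySem.List.mem_sorted, List.mem_map]
  have hpl := pv_runs_pairwise (pv_L2 model k) (pv_L2_pairwise model k)
  have hpr := List.Pairwise.filter (fun c => decide (0 < (pv_G model k c).length))
    (PySem.List.pairwise_lt_pyRange_one 1 (k + 1))
  refine List.eq_of_perm_of_sorted (fun a b _ _ h1 h2 => by omega) hpl hpr ?_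
  rw [List.perm_ext_iff_of_nodup
    (hpl.imp (fun h => ne_of_lt h)) (hpr.imp (fun h => ne_of_lt h))]
  intro c
  rw [pv_runs_mem _ c (pv_L2_pairwise model k), List.mem_filter]
  simp only [decide_eq_true_eq, pv_G_pos]
  constructor
  · rintro ⟨q, hq, rfl⟩
    obtain ⟨a, ha, rfl⟩ := (hmemL2 q).mp hq
    exact ⟨pv_key_mem k hk a, a, ha, rfl⟩
  · rintro ⟨_, a, ha, rfl⟩
    exact ⟨_, (hmemL2 _).mpr ⟨a, ha, rfl⟩, rfl⟩

theorem pv_main (model : List Int) (n k : Int) (hk : 1 ≤ k) :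
    decode_model model n k = decode_model_alt model n k := by
  rw [pv_A_char model n k hk]
  show _ = pv_runs (pv_L2 model k)
  rw [pv_runs_char (pv_L2 model k) (pv_L2_pairwise model k), pv_colors_eq model k hk]
  exact (List.map_congr_left (fun c _ => by rw [pv_vals_eq model k c])).symm

theorem pv_degen (model : List Int) (n k : Int) (hk : ¬ 1 ≤ k)
    (hall : ∀ a ∈ model, a ≤ 0) :
    decode_model model n k = decode_model_alt model n k := by
  have hP : model.filter (fun x => decide (0 < x)) = [] := by
    rw [List.filter_eq_nil_iff]
    intro a ha
    have := hall a ha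
    simp; omega
  have hR : PySem.List.pyRange 1 (k + 1) 1 = [] :=
    PySem.List.pyRange_one_eq_nil (by omega)
  simp only [decode_model, decode_model_alt, gt_iff_lt]
  rw [PySem.List.foldl_ite_eq_foldl_filter (p := fun a : Int => (0:Int) < a), hP, hR]
  have h1 : PySem.List.sorted ([] : List (Int × Int)) (fun p => p.2) false = [] := by
    rw [PySem.List.sorted_eq_nil_iff]
  have h2 : PySem.List.sorted ([] : List (Int × Int)) (fun p => p.1) false = [] := by
    rw [PySem.List.sorted_eq_nil_iff]
  simp [PySem.Dict.empty, h1, h2, pv_runs]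

-- ===== VERDICT (by name: the statement is the Claim_ definition above) =====
theorem decode_model_spec : Claim_equal_decode_model := by
  intro model n k _ hpre
  unfold Spec_decode_model
  by_cases hk : 1 ≤ k
  · exact pv_main model n k hk
  · exact pv_degen model n k hk (hpre.resolve_left hk)
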